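-- pv_equiv track=rewrite | github.com/astoeff/AI-Course-in-FMI | Homework_2/main.py | create_board_for_symmetric_board
-- ===== SOURCE A (Python) =====
-- def create_board_for_symmetric_board(n):
--     '''symmetric boards all follow this pattern:
--        _ Q _ _ _ _ _
--        _ _ _ Q _ _ _
--        _ _ _ _ _ Q _
--        Q _ _ _ _ _ _
--        _ _ Q _ _ _ _
--        _ _ _ _ Q _ _
--        _ _ _ _ _ _ Q
--     '''
--
--     board = []
--     even_cols_index = int(n/2)
--     odd_cols_index = 0
--     diagonal_index = n - 1
--     for i in range(n):
--         if i % 2 == 0: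
--             board.append(even_cols_index)
--             even_cols_index += 1
--         else:
--             board.append(odd_cols_index)
--             odd_cols_index += 1
--
--     return board
-- ===== SOURCE B (Python) =====
-- def create_board_for_symmetric_board(n):
--     '''Same board by staged construction: build the even-row column sequence and the
--     odd-row column sequence as two ranges, then interleave them.'''
--     evens = list(range(n // 2, n // 2 + (n + 1) // 2))
--     odds = list(range(n // 2))
--     board = []
--     for e, o in zip(evens, odds):
--         board.append(e)
--         board.append(o)
--     if len(evens) > len(odds):
--         board.append(evens[-1])
--     return board
-- ===== Notes on version B (the rewrite author's own statement) =====
-- stated objective: alternative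
-- what changed: Replaces the single stateful index loop maintaining even/odd counters with a staged construction: the even-row and odd-row column sequences are built as two separate ranges and then interleaved with zip plus a leftover element.
import Mathlib
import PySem

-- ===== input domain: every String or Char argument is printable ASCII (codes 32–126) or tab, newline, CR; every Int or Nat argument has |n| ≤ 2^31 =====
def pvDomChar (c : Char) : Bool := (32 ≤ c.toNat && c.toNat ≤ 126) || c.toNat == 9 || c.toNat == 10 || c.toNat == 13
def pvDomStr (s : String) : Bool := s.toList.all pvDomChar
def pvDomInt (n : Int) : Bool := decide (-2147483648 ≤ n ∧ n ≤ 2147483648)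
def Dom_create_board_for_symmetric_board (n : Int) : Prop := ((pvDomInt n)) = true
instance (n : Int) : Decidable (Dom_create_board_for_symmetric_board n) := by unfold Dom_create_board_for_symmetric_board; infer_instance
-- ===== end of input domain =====

-- B builds the even-row and odd-row column sequences as two ranges and interleaves them
-- (zip + leftover), instead of A's single index loop with maintained counters; objective: alternative.

-- ===== PORT A =====
-- int(n/2): n/2 is an exact float for |n| ≤ 2^31, so int(n/2) truncates toward zero = Int.tdiv n 2
def create_board_for_symmetric_board (n : Int) : List Int :=
  (((PySem.List.pyRange 0 n 1).foldl
    (fun (s : List Int × Int × Int) i =>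
      if PySem.Int.mod i 2 == 0 then (s.1 ++ [s.2.1], s.2.1 + 1, s.2.2)
      else (s.1 ++ [s.2.2], s.2.1, s.2.2 + 1))
    ([], Int.tdiv n 2, 0))).1

-- ===== PORT B =====
-- evens = range(n//2, n//2 + (n+1)//2), odds = range(n//2); interleave by zip, then the
-- leftover evens[-1] (pyGet? none = IndexError; unreachable under the length guard).
def create_board_for_symmetric_board_alt (n : Int) : List Int :=
  let evens := PySem.List.pyRange (PySem.Int.floordiv n 2)
      (PySem.Int.floordiv n 2 + PySem.Int.floordiv (n + 1) 2) 1
  let odds := PySem.List.pyRange 0 (PySem.Int.floordiv n 2) 1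
  let board := (evens.zip odds).foldl (fun acc p => acc ++ [p.1, p.2]) []
  if odds.length < evens.length then
    match PySem.List.pyGet? evens (-1) with
    | some x => board ++ [x]
    | none => board
  else board

-- ===== PRECONDITION & SPEC =====
def Spec_create_board_for_symmetric_board (n : Int) (out : List Int) : Prop := out = create_board_for_symmetric_board_alt n
instance (n : Int) (out : List Int) : Decidable (Spec_create_board_for_symmetric_board n out) := by unfold Spec_create_board_for_symmetric_board; infer_instance

-- ===== CLAIM (what is proved, stated in full; the proofs are below) =====
def Claim_equal_create_board_for_symmetric_board : Prop := ∀ (n : Int), Dom_create_board_for_symmetric_board n → Spec_create_board_for_symmetric_board n (create_board_for_symmetric_board n)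

-- ===== LEMMAS AND PROOFS =====

-- A's loop invariant: after folding over range(k), the board is the per-index closed form
-- and the counters are c + ⌈k/2⌉ and ⌊k/2⌋.
theorem pv_inv (c : Int) (k : Nat) :
    ((PySem.List.pyRange 0 (k : Int) 1).foldl
      (fun (s : List Int × Int × Int) i =>
        if PySem.Int.mod i 2 == 0 then (s.1 ++ [s.2.1], s.2.1 + 1, s.2.2)
        else (s.1 ++ [s.2.2], s.2.1, s.2.2 + 1))
      ([], c, 0)) =
    ((PySem.List.pyRange 0 (k : Int) 1).map
      (fun i => PySem.Int.floordiv i 2 +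
        (if PySem.Int.mod i 2 == 0 then c else 0)),
     c + (((k + 1) / 2 : Nat) : Int), ((k / 2 : Nat) : Int)) := by
  induction k with
  | zero => simp [PySem.List.pyRange_one_eq_nil]
  | succ k ih =>
    have hsplit : PySem.List.pyRange 0 ((k + 1 : Nat) : Int) 1
        = PySem.List.pyRange 0 (k : Int) 1 ++ [(k : Int)] := by
      push_cast
      exact PySem.List.pyRange_one_succ_right (by positivity)
    rw [hsplit, List.foldl_append, List.map_append, ih]
    have hm : PySem.Int.mod (k : Int) 2 = (((k % 2 : Nat)) : Int) :=
      PySem.Int.mod_natCast k 2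
    have hd : PySem.Int.floordiv (k : Int) 2 = (((k / 2 : Nat)) : Int) :=
      PySem.Int.floordiv_natCast k 2
    rcases Nat.even_or_odd k with he | ho
    · obtain ⟨m, hmeq⟩ := he
      subst hmeq
      simp only [List.foldl_cons, List.foldl_nil, List.map_cons, List.map_nil, hm, hd]
      have h2 : (m + m) % 2 = 0 := by omega
      simp only [h2, Nat.cast_zero]
      rw [if_pos (by decide : (((0:Int) == 0) = true))]
      simp only [Prod.mk.injEq]
      refine ⟨by simp; omega, by push_cast; omega, by push_cast; omega⟩
    · obtain ⟨m, hmeq⟩ := ho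
      subst hmeq
      simp only [List.foldl_cons, List.foldl_nil, List.map_cons, List.map_nil, hm, hd]
      have h2 : (2 * m + 1) % 2 = 1 := by omega
      simp only [h2, Nat.cast_one]
      rw [if_neg (by decide : ¬ (((1:Int) == 0) = true))]
      simp only [Prod.mk.injEq]
      refine ⟨by push_cast; simp, by push_cast; omega, by push_cast; omega⟩

-- B's appending fold over the zipped pairs is acc ++ the flat interleaving.
theorem pv_foldl_pairs (l : List (Int × Int)) (acc : List Int) :
    l.foldl (fun a p => a ++ [p.1, p.2]) acc = acc ++ l.flatMap (fun p => [p.1, p.2]) := by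
  induction l generalizing acc with
  | nil => simp
  | cons p l ih => simp [ih, List.append_assoc]

-- the last element of a mapped range
theorem pv_last (e : Nat) (s : Int) (h : 0 < e) :
    PySem.List.pyGet? ((List.range e).map (fun j : Nat => s + (j : Int))) (-1)
      = some (s + (e : Int) - 1) := by
  obtain ⟨e', rfl⟩ : ∃ e', e = e' + 1 := ⟨e - 1, by omega⟩
  rw [PySem.List.pyGet?_neg_one, List.range_succ, List.map_append]
  simp
  ring

-- front decomposition of a mapped range by two
theorem pv_range_shift2 (m : Nat) (f : Nat → Int) :
    (List.range (m + 2)).map f = f 0 :: f 1 :: (List.range m).map (fun j => f (j + 2)) := by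
  rw [List.range_succ_eq_map, List.range_succ_eq_map]
  simp [List.map_map, Function.comp]

-- peeling the first element off a mapped range
theorem pv_range_peel (e : Nat) (s : Int) :
    (List.range (e + 1)).map (fun j : Nat => s + (j : Int))
      = s :: (List.range e).map (fun j : Nat => (s + 1) + (j : Int)) := by
  rw [List.range_succ_eq_map, List.map_cons, List.map_map]
  congr 1
  · simp
  · apply List.map_congr_left
    intro j _
    simp [Function.comp]
    ring

-- Core lemma: interleaving the two ranges (zip + leftover) gives the per-index board.
theorem pv_ilv (o : Nat) : ∀ (e : Nat) (s t : Int), o ≤ e → e ≤ o + 1 →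
    (if ((List.range o).map (fun j : Nat => t + (j : Int))).length
        < ((List.range e).map (fun j : Nat => s + (j : Int))).length then
       match PySem.List.pyGet? ((List.range e).map (fun j : Nat => s + (j : Int))) (-1) with
       | some x =>
           (((List.range e).map (fun j : Nat => s + (j : Int))).zip
             ((List.range o).map (fun j : Nat => t + (j : Int)))).flatMap
             (fun p => [p.1, p.2]) ++ [x]
       | none =>
           (((List.range e).map (fun j : Nat => s + (j : Int))).zip
             ((List.range o).map (fun j : Nat => t + (j : Int)))).flatMap
             (fun p => [p.1, p.2])
     else
       (((List.range e).map (fun j : Nat => s + (j : Int))).zip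
         ((List.range o).map (fun j : Nat => t + (j : Int)))).flatMap
         (fun p => [p.1, p.2]))
  = (List.range (e + o)).map
      (fun j : Nat => if j % 2 = 0 then s + ((j / 2 : Nat) : Int) else t + ((j / 2 : Nat) : Int)) := by
  induction o with
  | zero =>
    intro e s t _ he
    interval_cases e
    · simp
    · simp [PySem.List.pyGet?_neg_one]
  | succ o ih =>
    intro e s t hoe he
    obtain ⟨e', rfl⟩ : ∃ e', e = e' + 1 := ⟨e - 1, by omega⟩
    have h1 : o ≤ e' := by omega
    have h2 : e' ≤ o + 1 := by omega
    have hIH := ih e' (s + 1) (t + 1) h1 h2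
    have hk : e' + 1 + (o + 1) = (e' + o) + 2 := by omega
    have hr : (List.range ((e' + o) + 2)).map
        (fun j : Nat => if j % 2 = 0 then s + ((j / 2 : Nat) : Int) else t + ((j / 2 : Nat) : Int))
        = s :: t :: (List.range (e' + o)).map
            (fun j : Nat => if j % 2 = 0 then (s + 1) + ((j / 2 : Nat) : Int)
                            else (t + 1) + ((j / 2 : Nat) : Int)) := by
      rw [pv_range_shift2]
      norm_num
      intro j _
      by_cases hj : j % 2 = 0 <;> simp [hj] <;> omega
    rw [hk, hr, pv_range_peel e' s, pv_range_peel o t]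
    by_cases hlt : o < e'
    · have hcond : (t :: (List.range o).map (fun j : Nat => (t + 1) + (j : Int))).length
          < (s :: (List.range e').map (fun j : Nat => (s + 1) + (j : Int))).length := by
        simp; omega
      have hcond' : ((List.range o).map (fun j : Nat => (t + 1) + (j : Int))).length
          < ((List.range e').map (fun j : Nat => (s + 1) + (j : Int))).length := by
        simp; omega
      rw [if_pos hcond]
      rw [if_pos hcond', pv_last e' (s + 1) (by omega)] at hIH
      have hget : PySem.List.pyGet?
          (s :: (List.range e').map (fun j : Nat => (s + 1) + (j : Int))) (-1)
          = some ((s + 1) + (e' : Int) - 1) := by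
        rw [← pv_range_peel e' s, pv_last (e' + 1) s (by omega)]
        push_cast; ring_nf
      rw [hget]
      simp only [List.zip_cons_cons, List.flatMap_cons, List.cons_append, List.nil_append]
      rw [← hIH]
    · have heo : e' = o := by omega
      subst heo
      have hcond : ¬ (t :: (List.range e').map (fun j : Nat => (t + 1) + (j : Int))).length
          < (s :: (List.range e').map (fun j : Nat => (s + 1) + (j : Int))).length := by
        simp
      have hcond' : ¬ ((List.range e').map (fun j : Nat => (t + 1) + (j : Int))).length
          < ((List.range e').map (fun j : Nat => (s + 1) + (j : Int))).length := by
        simp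
      rw [if_neg hcond]
      rw [if_neg hcond'] at hIH
      simp only [List.zip_cons_cons, List.flatMap_cons, List.cons_append, List.nil_append]
      rw [← hIH]

-- ===== VERDICT (by name: the statement is the Claim_ definition above) =====
theorem create_board_for_symmetric_board_spec : Claim_equal_create_board_for_symmetric_board := by
  intro n _
  unfold Spec_create_board_for_symmetric_board create_board_for_symmetric_board
    create_board_for_symmetric_board_alt
  by_cases hn : n ≤ 0
  · have hfd : PySem.Int.floordiv n 2 = n / 2 := PySem.Int.floordiv_eq_ediv_of_pos (by norm_num)
    have hfd1 : PySem.Int.floordiv (n + 1) 2 = (n + 1) / 2 :=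
      PySem.Int.floordiv_eq_ediv_of_pos (by norm_num)
    rw [PySem.List.pyRange_one_eq_nil hn]
    simp only [List.foldl_nil, hfd, hfd1]
    rw [PySem.List.pyRange_one_eq_nil (by omega : n / 2 + (n + 1) / 2 ≤ n / 2),
        PySem.List.pyRange_one_eq_nil (by omega : n / 2 ≤ (0 : Int))]
    simp
  · have hn : (0 : Int) < n := by omega
    obtain ⟨k, rfl⟩ : ∃ k : Nat, (k : Int) = n := ⟨n.toNat, Int.toNat_of_nonneg hn.le⟩
    have htd : Int.tdiv (k : Int) 2 = PySem.Int.floordiv (k : Int) 2 := by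
      rw [PySem.Int.floordiv_eq_ediv_of_pos (by norm_num)]
      exact Int.tdiv_eq_ediv_of_nonneg (by positivity)
    have hc : PySem.Int.floordiv (k : Int) 2 = ((k / 2 : Nat) : Int) :=
      PySem.Int.floordiv_natCast k 2
    have hd : PySem.Int.floordiv ((k : Int) + 1) 2 = (((k + 1) / 2 : Nat) : Int) := by
      rw [show ((k : Int) + 1) = ((k + 1 : Nat) : Int) by push_cast; ring]
      exact PySem.Int.floordiv_natCast (k + 1) 2
    rw [htd, pv_inv]
    have hevens : PySem.List.pyRange (PySem.Int.floordiv (k : Int) 2)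
        (PySem.Int.floordiv (k : Int) 2 + PySem.Int.floordiv ((k : Int) + 1) 2) 1
        = (List.range ((k + 1) / 2)).map (fun j : Nat => ((k / 2 : Nat) : Int) + (j : Int)) := by
      rw [hc, hd, PySem.List.pyRange_one]
      have harg : (((k / 2 : Nat) : Int) + (((k + 1) / 2 : Nat) : Int) - ((k / 2 : Nat) : Int))
          = (((k + 1) / 2 : Nat) : Int) := by ring
      rw [harg, Int.toNat_natCast]
    have hodds : PySem.List.pyRange 0 (PySem.Int.floordiv (k : Int) 2) 1
        = (List.range (k / 2)).map (fun j : Nat => (0 : Int) + (j : Int)) := by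
      rw [hc, PySem.List.pyRange_one]
      rw [Int.sub_zero, Int.toNat_natCast]
    simp only [hevens, hodds, pv_foldl_pairs, List.nil_append]
    rw [pv_ilv (k / 2) ((k + 1) / 2) ((k / 2 : Nat) : Int) 0 (by omega) (by omega)]
    rw [PySem.List.pyRange_one]
    have hke : ((k : Int) - 0).toNat = k := by omega
    rw [hke]
    have hkk : (k + 1) / 2 + k / 2 = k := by omega
    rw [hkk, List.map_map]
    apply List.map_congr_left
    intro j _
    simp only [Function.comp_apply, zero_add]
    have hdj : PySem.Int.floordiv (j : Int) 2 = ((j / 2 : Nat) : Int) :=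
      PySem.Int.floordiv_natCast j 2
    have hmj : PySem.Int.mod (j : Int) 2 = ((j % 2 : Nat) : Int) :=
      PySem.Int.mod_natCast j 2
    rw [hdj, hmj]
    by_cases hj : j % 2 = 0
    · rw [hj]
      simp
      ring
    · have hj1 : j % 2 = 1 := by omega
      rw [hj1]
      simp
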